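-- pv_equiv track=rewrite | github.com/Arcxzian/Practicing_coding_skills | batch_seven/Batch_Seven_Program_4.py | manual_islower
-- ===== SOURCE A (Python) =====
-- def manual_islower(text):
--     found_alpha = False
--
--     for char in text:
--         if 'A' <= char <= 'Z':
--             return False
--
--         if 'a' <= char <= 'z':
--             found_alpha = True
--
--     return found_alpha
-- ===== SOURCE B (Python) =====
-- def manual_islower(text):
--     return not any('A' <= c <= 'Z' for c in text) and any('a' <= c <= 'z' for c in text)
-- ===== Notes on version B (the rewrite author's own statement) =====
-- stated objective: simpler
-- what changed: Replaces the single stateful pass with a found_alpha flag and early uppercase return by two independent existence scans: no uppercase letter AND some lowercase letter.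
import Mathlib
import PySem

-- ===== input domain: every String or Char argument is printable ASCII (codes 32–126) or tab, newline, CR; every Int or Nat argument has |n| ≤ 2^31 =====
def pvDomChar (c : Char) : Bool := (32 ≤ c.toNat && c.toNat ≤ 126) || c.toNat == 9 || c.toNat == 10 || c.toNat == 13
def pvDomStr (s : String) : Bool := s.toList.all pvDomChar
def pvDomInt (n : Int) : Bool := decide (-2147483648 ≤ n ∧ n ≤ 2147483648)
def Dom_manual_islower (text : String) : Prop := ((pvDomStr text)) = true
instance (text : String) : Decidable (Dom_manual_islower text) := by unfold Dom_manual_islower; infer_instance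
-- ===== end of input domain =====

-- B replaces A's single stateful pass (flag + early return) by two independent existence scans; objective: simpler.

-- ===== PORT A =====
-- A's loop with early return: recursion over the characters carrying found_alpha
def manualIslowerLoop (cs : List Char) (found_alpha : Bool) : Bool :=
  match cs with
  | [] => found_alpha
  | c :: rest =>
    if 'A' ≤ c ∧ c ≤ 'Z' then false
    else if 'a' ≤ c ∧ c ≤ 'z' then manualIslowerLoop rest true
    else manualIslowerLoop rest found_alpha

def manual_islower (text : String) : Bool :=
  manualIslowerLoop text.toList false

-- ===== PORT B =====
def manual_islower_alt (text : String) : Bool :=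
  !(text.toList.any (fun c => decide ('A' ≤ c ∧ c ≤ 'Z'))) &&
    text.toList.any (fun c => decide ('a' ≤ c ∧ c ≤ 'z'))

-- ===== PRECONDITION & SPEC =====
def Spec_manual_islower (text : String) (out : Bool) : Prop := out = manual_islower_alt text
instance (text : String) (out : Bool) : Decidable (Spec_manual_islower text out) := by unfold Spec_manual_islower; infer_instance

-- ===== CLAIM (what is proved, stated in full; the proofs are below) =====
def Claim_equal_manual_islower : Prop := ∀ (text : String), Dom_manual_islower text → Spec_manual_islower text (manual_islower text)

-- ===== LEMMAS AND PROOFS =====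
theorem manualIslowerLoop_eq (cs : List Char) (f : Bool) :
    manualIslowerLoop cs f =
      (!(cs.any (fun c => decide ('A' ≤ c ∧ c ≤ 'Z'))) &&
        (f || cs.any (fun c => decide ('a' ≤ c ∧ c ≤ 'z')))) := by
  induction cs generalizing f with
  | nil => simp [manualIslowerLoop]
  | cons c rest ih =>
    simp only [manualIslowerLoop, List.any_cons]
    split_ifs with h1 h2
    · simp [h1]
    · simp [ih, h1, h2]
    · simp [ih, h1, h2]

-- ===== VERDICT (by name: the statement is the Claim_ definition above) =====
theorem manual_islower_spec : Claim_equal_manual_islower := by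
  intro text _
  unfold Spec_manual_islower manual_islower manual_islower_alt
  rw [manualIslowerLoop_eq]
  simp
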